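-- pv_equiv track=rewrite | github.com/raonslab2/fcBoardKicad | kicad_auto_builder/net_validator.py | match_pin
-- ===== SOURCE A (Python) =====
-- from typing import Optional
--
-- def match_pin(pin_key, pins: list[dict]) -> Optional[dict]:
--     """핀 키가 핀 목록과 매칭되는지 확인합니다.
--
--     매칭 규칙 (우선순위):
--     1. pin_key == pin.name (exact)
--     2. pin_key == pin.number (exact)
--     3. pin_key.lower() == pin.name.lower() (case-insensitive)
--
--     Args:
--         pin_key: YAML에서 지정한 핀 이름 (str 또는 int)
--         pins: 심볼의 핀 목록 [{name, number, type}, ...]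
--
--     Returns:
--         매칭된 핀 정보 또는 None
--     """
--     if not pins:
--         return None
--
--     # YAML에서 숫자로 파싱될 수 있으므로 문자열 변환
--     pin_key = str(pin_key)
--
--     # 1. name exact match
--     for pin in pins:
--         if pin.get("name") == pin_key:
--             return pin
--
--     # 2. number exact match
--     for pin in pins:
--         if pin.get("number") == pin_key:
--             return pin
--
--     # 3. name case-insensitive match
--     pin_key_lower = pin_key.lower()
--     for pin in pins:
--         if pin.get("name", "").lower() == pin_key_lower:
--             return pin
--
--     return None
-- ===== SOURCE B (Python) =====
-- def match_pin(pin_key, pins):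
--     pin_key = str(pin_key)
--     key_lower = pin_key.lower()
--     name_hit = number_hit = ci_hit = None
--     for pin in pins:
--         if name_hit is None and pin.get("name") == pin_key:
--             name_hit = pin
--         if number_hit is None and pin.get("number") == pin_key:
--             number_hit = pin
--         if ci_hit is None and pin.get("name", "").lower() == key_lower:
--             ci_hit = pin
--     if name_hit is not None:
--         return name_hit
--     if number_hit is not None:
--         return number_hit
--     return ci_hit
-- ===== Notes on version B (the rewrite author's own statement) =====
-- stated objective: alternative
-- what changed: Replaces A's three sequential scans of the pin list with a single pass that records the earliest match for each of the three priority buckets and picks by priority afterwards.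
import Mathlib
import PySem

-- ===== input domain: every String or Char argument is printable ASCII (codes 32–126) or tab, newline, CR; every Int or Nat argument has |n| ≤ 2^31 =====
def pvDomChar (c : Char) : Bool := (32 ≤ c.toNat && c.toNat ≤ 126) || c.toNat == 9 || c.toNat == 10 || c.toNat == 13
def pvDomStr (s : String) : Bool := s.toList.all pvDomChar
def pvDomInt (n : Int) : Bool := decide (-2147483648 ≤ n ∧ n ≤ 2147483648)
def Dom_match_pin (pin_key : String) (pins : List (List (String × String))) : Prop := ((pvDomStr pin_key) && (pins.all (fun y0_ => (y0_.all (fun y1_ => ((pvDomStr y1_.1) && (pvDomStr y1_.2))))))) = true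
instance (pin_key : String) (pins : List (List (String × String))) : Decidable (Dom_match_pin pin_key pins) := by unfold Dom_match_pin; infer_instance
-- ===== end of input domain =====

-- ===== PORT A =====
-- B is a single pass keeping the earliest match per priority bucket instead of A's three scans.
-- A-side helpers: one structural recursion per 'for' loop of A
def pvLoopName (key : String) : List (List (String × String)) → Option (List (String × String))
  | [] => none
  | p :: rest => if PySem.Dict.get? (PySem.Dict.mk p) "name" = some key then some p else pvLoopName key rest

def pvLoopNum (key : String) : List (List (String × String)) → Option (List (String × String))
  | [] => none
  | p :: rest => if PySem.Dict.get? (PySem.Dict.mk p) "number" = some key then some p else pvLoopNum key rest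

def pvLoopCI (keyL : String) : List (List (String × String)) → Option (List (String × String))
  | [] => none
  | p :: rest => if PySem.Str.lower (PySem.Dict.getD (PySem.Dict.mk p) "name" "") = keyL then some p else pvLoopCI keyL rest

def match_pin (pin_key : String) (pins : List (List (String × String))) : Option (List (String × String)) :=
  if pins.isEmpty then none
  else
    match pvLoopName pin_key pins with
    | some p => some p
    | none =>
      match pvLoopNum pin_key pins with
      | some p => some p
      | none => pvLoopCI (PySem.Str.lower pin_key) pins

-- ===== PORT B =====
-- one fold step updating the three 'first match' slots, each only while still unset
def pvStep (key keyL : String)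
    (s : Option (List (String × String)) × Option (List (String × String)) × Option (List (String × String)))
    (pin : List (String × String)) :
    Option (List (String × String)) × Option (List (String × String)) × Option (List (String × String)) :=
  ( if s.1.isNone ∧ PySem.Dict.get? (PySem.Dict.mk pin) "name" = some key then some pin else s.1,
    if s.2.1.isNone ∧ PySem.Dict.get? (PySem.Dict.mk pin) "number" = some key then some pin else s.2.1,
    if s.2.2.isNone ∧ PySem.Str.lower (PySem.Dict.getD (PySem.Dict.mk pin) "name" "") = keyL then some pin else s.2.2 )

def match_pin_alt (pin_key : String) (pins : List (List (String × String))) : Option (List (String × String)) :=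
  let keyL := PySem.Str.lower pin_key
  let s := pins.foldl (pvStep pin_key keyL) (none, none, none)
  match s.1 with
  | some p => some p
  | none =>
    match s.2.1 with
    | some p => some p
    | none => s.2.2

-- ===== PRECONDITION & SPEC =====
def Spec_match_pin (pin_key : String) (pins : List (List (String × String))) (out : Option (List (String × String))) : Prop := out = match_pin_alt pin_key pins
instance (pin_key : String) (pins : List (List (String × String))) (out : Option (List (String × String))) : Decidable (Spec_match_pin pin_key pins out) := by unfold Spec_match_pin; infer_instance

-- ===== CLAIM (what is proved, stated in full; the proofs are below) =====
def Claim_equal_match_pin : Prop := ∀ (pin_key : String) (pins : List (List (String × String))), Dom_match_pin pin_key pins → Spec_match_pin pin_key pins (match_pin pin_key pins)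

-- ===== LEMMAS AND PROOFS =====
theorem pvFold_eq (key keyL : String) (pins : List (List (String × String)))
    (n m c : Option (List (String × String))) :
    pins.foldl (pvStep key keyL) (n, m, c) =
      (n.orElse (fun _ => pvLoopName key pins),
       m.orElse (fun _ => pvLoopNum key pins),
       c.orElse (fun _ => pvLoopCI keyL pins)) := by
  induction pins generalizing n m c with
  | nil => cases n <;> cases m <;> cases c <;> simp [Option.orElse, pvLoopName, pvLoopNum, pvLoopCI]
  | cons p rest ih =>
    simp only [List.foldl_cons, pvStep, ih]
    cases n <;> cases m <;> cases c <;>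
      simp [pvLoopName, pvLoopNum, pvLoopCI, Option.orElse] <;> split_ifs <;> simp

-- ===== VERDICT (by name: the statement is the Claim_ definition above) =====
theorem match_pin_spec : Claim_equal_match_pin := by
  intro pin_key pins _
  unfold Spec_match_pin match_pin match_pin_alt
  simp only [pvFold_eq]
  cases pins with
  | nil => simp [pvLoopName, pvLoopNum, pvLoopCI, Option.orElse]
  | cons p rest =>
    simp only [List.isEmpty_cons, Bool.false_eq_true, if_false, Option.orElse]
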